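-- pv_equiv track=rewrite | github.com/MrBrantCode/unitest_baseline | mut_generate/mist_train_cf/cf_4800/solution.py | string_formatter
-- ===== SOURCE A (Python) =====
-- def string_formatter(s):
--     words = []
--     word = ''
--     for char in s:
--         if char.isalpha():
--             word += char.lower()
--         elif word:
--             words.append(word)
--             word = ''
--     if word:
--         words.append(word)
--
--     # Remove duplicates
--     unique_words = []
--     for word in words:
--         if word not in unique_words:
--             unique_words.append(word)
--
--     # Sort words alphabetically
--     def merge_sort(words):
--         if len(words) <= 1:
--             return words
--         mid = len(words) // 2
--         left = merge_sort(words[:mid])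
--         right = merge_sort(words[mid:])
--         return merge(left, right)
--
--     def merge(left, right):
--         result = []
--         while left and right:
--             if left[0] < right[0]:
--                 result.append(left.pop(0))
--             else:
--                 result.append(right.pop(0))
--         result.extend(left)
--         result.extend(right)
--         return result
--
--     return merge_sort(unique_words)
-- ===== SOURCE B (Python) =====
-- def string_formatter(s):
--     # Map every non-alphabetic character to a space (lowercasing the rest),
--     # then let str.split do the tokenization; dedup+sort in one step.
--     cleaned = ''.join(c.lower() if c.isalpha() else ' ' for c in s)
--     return sorted(set(cleaned.split()))
-- ===== Notes on version B (the rewrite author's own statement) =====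
-- stated objective: idiomatic
-- what changed: B replaces A's manual character state machine, membership-scan dedup loop and hand-written pop(0)-based merge sort by mapping non-alphabetic characters to spaces and using str.split, set() and sorted().
import Mathlib
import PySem

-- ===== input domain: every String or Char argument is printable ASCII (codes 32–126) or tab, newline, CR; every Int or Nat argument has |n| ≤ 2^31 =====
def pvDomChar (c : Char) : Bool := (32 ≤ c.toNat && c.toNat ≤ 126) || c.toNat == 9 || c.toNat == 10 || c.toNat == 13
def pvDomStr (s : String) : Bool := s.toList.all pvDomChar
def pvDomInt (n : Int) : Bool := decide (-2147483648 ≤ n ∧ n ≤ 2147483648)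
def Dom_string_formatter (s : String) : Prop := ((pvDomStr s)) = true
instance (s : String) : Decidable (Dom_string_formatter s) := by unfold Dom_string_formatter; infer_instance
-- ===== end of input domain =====

-- B maps non-alphabetic characters to spaces and uses split/set/sorted instead of A's
-- manual state machine, quadratic dedup loop and hand-written merge sort (objective: idiomatic).


-- ===== PORT A =====
-- one step of A's for-loop: state = (words, word); word kept as List Char
-- (Python string concatenation of single ASCII chars is exactly List.append of one Char)
def pvStepA (st : List String × List Char) (c : Char) : List String × List Char :=
  if PySem.Chars.isalpha c then (st.1, st.2 ++ [PySem.Chars.lowerChar c])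
  else if st.2 ≠ [] then (st.1 ++ [String.ofList st.2], []) else st

-- A's inner merge(left, right): the while loop with pop(0) is structural recursion on the heads
def pvMergeA : List String → List String → List String
  | [], r => r
  | l, [] => l
  | a :: ls, b :: rs =>
    if a < b then a :: pvMergeA ls (b :: rs) else b :: pvMergeA (a :: ls) rs

-- A's merge_sort: words[:mid] = take mid, words[mid:] = drop mid
def pvMergeSortA (ws : List String) : List String :=
  if _h : ws.length ≤ 1 then ws
  else
    let mid := ws.length / 2
    pvMergeA (pvMergeSortA (ws.take mid)) (pvMergeSortA (ws.drop mid))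
termination_by ws.length
decreasing_by
  · simp only [List.length_take]; omega
  · simp only [List.length_drop]; omega

def string_formatter (s : String) : List String :=
  let st := s.toList.foldl pvStepA ([], [])
  let words := if st.2 ≠ [] then st.1 ++ [String.ofList st.2] else st.1
  let unique := words.foldl (fun acc w => if w ∈ acc then acc else acc ++ [w]) []
  pvMergeSortA unique

-- ===== PORT B =====
def string_formatter_alt (s : String) : List String :=
  -- cleaned = ''.join(c.lower() if c.isalpha() else ' ' for c in s)
  let cleaned := PySem.Str.join ""
    (s.toList.map (fun c =>
      if PySem.Chars.isalpha c then String.ofList [PySem.Chars.lowerChar c] else " "))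
  -- sorted(set(cleaned.split()))
  PySem.List.sorted (PySem.Set.ofList (PySem.Str.split₀ cleaned)) (fun x => x) false

-- ===== PRECONDITION & SPEC =====
def Spec_string_formatter (s : String) (out : List String) : Prop := out = string_formatter_alt s
instance (s : String) (out : List String) : Decidable (Spec_string_formatter s out) := by unfold Spec_string_formatter; infer_instance

-- ===== CLAIM (what is proved, stated in full; the proofs are below) =====
def Claim_equal_string_formatter : Prop := ∀ (s : String), Dom_string_formatter s → Spec_string_formatter s (string_formatter s)

-- ===== LEMMAS AND PROOFS =====

-- the per-character cleaning map of B
def pvClean (c : Char) : Char :=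
  if PySem.Chars.isalpha c then PySem.Chars.lowerChar c else ' '

-- reference tokenizer both tokenizations are reduced to
def pvTok : List Char → List Char → List (List Char)
  | [], w => if w = [] then [] else [w]
  | c :: cs, w =>
    if PySem.Chars.isalpha c then pvTok cs (w ++ [PySem.Chars.lowerChar c])
    else if w = [] then pvTok cs [] else w :: pvTok cs []

lemma pvChar_ofNat_toNat (n : Nat) (h : n < 55296) : (Char.ofNat n).toNat = n := by
  unfold Char.ofNat
  simp only [Char.ofNatAux]
  rw [dif_pos (Or.inl h)]
  simp [UInt32.toNat_ofNatLT]

lemma pvLower_range (c : Char) (h : PySem.Chars.isalpha c = true) :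
    97 ≤ (PySem.Chars.lowerChar c).toNat ∧ (PySem.Chars.lowerChar c).toNat ≤ 122 := by
  unfold PySem.Chars.isalpha PySem.Chars.isupper PySem.Chars.islower at h
  simp only [Bool.or_eq_true, Bool.and_eq_true, decide_eq_true_eq, Char.le_def,
    UInt32.le_iff_toNat_le] at h
  unfold PySem.Chars.lowerChar PySem.Chars.isupper
  rcases h with ⟨h1, h2⟩ | ⟨h1, h2⟩
  · have h1' : 65 ≤ c.toNat := h1
    have h2' : c.toNat ≤ 90 := h2
    rw [if_pos (show (decide ('A' ≤ c) && decide (c ≤ 'Z')) = true by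
      simp only [Bool.and_eq_true, decide_eq_true_eq, Char.le_def, UInt32.le_iff_toNat_le]
      exact ⟨h1, h2⟩)]
    rw [pvChar_ofNat_toNat _ (by omega)]
    omega
  · have h1' : 97 ≤ c.toNat := h1
    have h2' : c.toNat ≤ 122 := h2
    by_cases hu : (decide ('A' ≤ c) && decide (c ≤ 'Z')) = true
    · simp only [Bool.and_eq_true, decide_eq_true_eq, Char.le_def,
        UInt32.le_iff_toNat_le] at hu
      have : c.toNat ≤ 90 := hu.2
      omega
    · rw [if_neg hu]; omega

lemma pvIsspace_of_lower (x : Char) (h1 : 97 ≤ x.toNat) (h2 : x.toNat ≤ 122) :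
    PySem.Chars.isspace x = false := by
  unfold PySem.Chars.isspace
  simp only [Bool.or_eq_false_iff, Bool.and_eq_false_iff, decide_eq_false_iff_not]
  omega

lemma pvClean_isspace (c : Char) :
    PySem.Chars.isspace (pvClean c) = !PySem.Chars.isalpha c := by
  by_cases h : PySem.Chars.isalpha c = true
  · rw [pvClean, if_pos h, h, Bool.not_true]
    obtain ⟨ha, hb⟩ := pvLower_range c h
    exact pvIsspace_of_lower _ ha hb
  · simp only [Bool.not_eq_true] at h
    rw [pvClean, if_neg (by simp [h]), h, Bool.not_false]
    decide

-- A's fold equals the reference tokenizer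
lemma foldA_eq (cs : List Char) (ws : List String) (w : List Char) :
    (let st := cs.foldl pvStepA (ws, w)
     if st.2 ≠ [] then st.1 ++ [String.ofList st.2] else st.1)
    = ws ++ (pvTok cs w).map String.ofList := by
  induction cs generalizing ws w with
  | nil =>
    by_cases h : w = [] <;> simp [pvTok, h]
  | cons c cs ih =>
    by_cases h : PySem.Chars.isalpha c = true
    · have h1 : pvStepA (ws, w) c = (ws, w ++ [PySem.Chars.lowerChar c]) := by
        simp [pvStepA, h]
      have h2 : pvTok (c :: cs) w = pvTok cs (w ++ [PySem.Chars.lowerChar c]) := by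
        simp [pvTok, h]
      simp only [List.foldl_cons, h1, h2]
      exact ih ws _
    · by_cases hw : w = []
      · subst hw
        have h1 : pvStepA (ws, []) c = (ws, []) := by simp [pvStepA, h]
        have h2 : pvTok (c :: cs) [] = pvTok cs [] := by simp [pvTok, h]
        simp only [List.foldl_cons, h1, h2]
        exact ih ws []
      · have h1 : pvStepA (ws, w) c = (ws ++ [String.ofList w], []) := by
          simp [pvStepA, h, hw]
        have h2 : pvTok (c :: cs) w = w :: pvTok cs [] := by simp [pvTok, h, hw]
        simp only [List.foldl_cons, h1, h2]
        rw [ih (ws ++ [String.ofList w]) []]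
        simp

-- split₀.go on a cleaned list equals the reference tokenizer
lemma go_eq (cs : List Char) (cur : List Char) (acc : List (List Char)) :
    PySem.Chars.split₀.go (cs.map pvClean) cur acc
    = acc.reverse ++ (pvTok cs cur.reverse).map (fun w => w) := by
  induction cs generalizing cur acc with
  | nil =>
    by_cases h : cur = [] <;>
      simp [PySem.Chars.split₀.go, pvTok, h, List.isEmpty_iff]
  | cons c cs ih =>
    simp only [List.map_cons, PySem.Chars.split₀.go]
    by_cases h : PySem.Chars.isalpha c = true
    · rw [if_neg (by simp [pvClean_isspace, h])]
      have hc : pvClean c = PySem.Chars.lowerChar c := by simp [pvClean, h]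
      rw [hc, ih]
      have h2 : pvTok (c :: cs) cur.reverse
          = pvTok cs (cur.reverse ++ [PySem.Chars.lowerChar c]) := by simp [pvTok, h]
      rw [h2]
      simp
    · rw [if_pos (by simp [pvClean_isspace, h])]
      by_cases hcur : cur = []
      · rw [if_pos (by simp [hcur]), ih]
        have h2 : pvTok (c :: cs) cur.reverse = pvTok cs [] := by
          simp [pvTok, h, hcur]
        rw [h2]
        simp
      · rw [if_neg (by simpa [List.isEmpty_iff] using hcur), ih]
        have h2 : pvTok (c :: cs) cur.reverse = cur.reverse :: pvTok cs [] := by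
          simp [pvTok, h, hcur]
        rw [h2]
        simp

-- A's dedup loop is PySem.Set.ofList
lemma dedupA_eq (ws : List String) (acc : List String) :
    ws.foldl (fun acc w => if w ∈ acc then acc else acc ++ [w]) acc
    = ws.foldl PySem.Set.add acc := by
  induction ws generalizing acc with
  | nil => rfl
  | cons w ws ih =>
    simp only [List.foldl_cons]
    have h : (if w ∈ acc then acc else acc ++ [w]) = PySem.Set.add acc w := by
      simp [PySem.Set.add, PySem.Set.contains, List.contains_eq_mem]
    rw [h, ih]

-- merge is a permutation of its inputs
lemma mergeA_perm : ∀ (l r : List String), (pvMergeA l r).Perm (l ++ r)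
  | [], r => by simp [pvMergeA]
  | a :: ls, [] => by simp [pvMergeA]
  | a :: ls, b :: rs => by
    simp only [pvMergeA]
    split_ifs with h
    · exact (mergeA_perm ls (b :: rs)).cons a
    · exact ((mergeA_perm (a :: ls) rs).cons b).trans List.perm_middle.symm

-- merge preserves sortedness (≤)
lemma mergeA_sorted : ∀ (l r : List String),
    l.Pairwise (· ≤ ·) → r.Pairwise (· ≤ ·) → (pvMergeA l r).Pairwise (· ≤ ·)
  | [], r, _, hr => by simp only [pvMergeA]; exact hr
  | a :: ls, [], hl, _ => by simp only [pvMergeA]; exact hl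
  | a :: ls, b :: rs, hl, hr => by
    simp only [pvMergeA]
    rcases List.pairwise_cons.mp hl with ⟨ha, hls⟩
    rcases List.pairwise_cons.mp hr with ⟨hb, hrs⟩
    split_ifs with h
    · refine List.pairwise_cons.mpr ⟨?_, mergeA_sorted ls (b :: rs) hls hr⟩
      intro x hx
      rcases List.mem_append.mp ((mergeA_perm ls (b :: rs)).mem_iff.mp hx) with h1 | h1
      · exact ha x h1
      · rcases List.mem_cons.mp h1 with rfl | h2
        · exact le_of_lt h
        · exact (le_of_lt h).trans (hb x h2)
    · refine List.pairwise_cons.mpr ⟨?_, mergeA_sorted (a :: ls) rs hl hrs⟩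
      intro x hx
      rcases List.mem_append.mp ((mergeA_perm (a :: ls) rs).mem_iff.mp hx) with h1 | h1
      · rcases List.mem_cons.mp h1 with rfl | h2
        · exact le_of_not_gt h
        · exact (le_of_not_gt h).trans (ha x h2)
      · exact hb x h1

lemma mergeSortA_perm (ws : List String) : (pvMergeSortA ws).Perm ws := by
  rw [pvMergeSortA]
  split_ifs with h
  · exact List.Perm.refl ws
  · refine (mergeA_perm _ _).trans ?_
    refine ((mergeSortA_perm _).append (mergeSortA_perm _)).trans ?_
    rw [List.take_append_drop]
termination_by ws.length
decreasing_by
  · simp only [List.length_take]; omega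
  · simp only [List.length_drop]; omega

lemma mergeSortA_sorted (ws : List String) : (pvMergeSortA ws).Pairwise (· ≤ ·) := by
  rw [pvMergeSortA]
  split_ifs with h
  · rcases ws with _ | ⟨a, _ | ⟨b, t⟩⟩ <;> simp_all
  · exact mergeA_sorted _ _ (mergeSortA_sorted _) (mergeSortA_sorted _)
termination_by ws.length
decreasing_by
  · simp only [List.length_take]; omega
  · simp only [List.length_drop]; omega

-- A's merge sort on a duplicate-free list is Python's sorted
lemma mergeSortA_eq_sorted (ws : List String) (hnd : ws.Nodup) :
    pvMergeSortA ws = PySem.List.sorted ws (fun x => x) false := by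
  refine (PySem.List.sorted_eq_of_perm_of_pairwise_lt ws (pvMergeSortA ws) (fun x => x)
    (mergeSortA_perm ws) ?_).symm
  have hnd' : (pvMergeSortA ws).Nodup := (mergeSortA_perm ws).nodup_iff.mpr hnd
  have hle := mergeSortA_sorted ws
  exact (List.Pairwise.and hle hnd').imp (fun {a b} ⟨h1, h2⟩ => lt_of_le_of_ne h1 h2)

lemma toList_cleaned (s : String) :
    (PySem.Str.join ""
      (s.toList.map (fun c =>
        if PySem.Chars.isalpha c then String.ofList [PySem.Chars.lowerChar c] else " "))).toList
    = s.toList.map pvClean := by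
  rw [PySem.Str.toList_join]
  have h : (s.toList.map (fun c =>
      if PySem.Chars.isalpha c then String.ofList [PySem.Chars.lowerChar c] else " ")).map
        String.toList = (s.toList.map pvClean).map (fun c => [c]) := by
    simp only [List.map_map, List.map_inj_left]
    intro c _
    by_cases h : PySem.Chars.isalpha c = true <;> simp [h, pvClean]
  rw [h]
  simpa using PySem.Chars.join_nil_singletons (s.toList.map pvClean)

-- ===== VERDICT (by name: the statement is the Claim_ definition above) =====
theorem string_formatter_spec : Claim_equal_string_formatter := by
  intro s _
  unfold Spec_string_formatter string_formatter string_formatter_alt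
  have htokB : PySem.Str.split₀ (PySem.Str.join ""
      (s.toList.map (fun c =>
        if PySem.Chars.isalpha c then String.ofList [PySem.Chars.lowerChar c] else " ")))
      = (pvTok s.toList []).map String.ofList := by
    unfold PySem.Str.split₀
    rw [toList_cleaned, PySem.Chars.split₀]
    have := go_eq s.toList [] []
    simp only [List.reverse_nil] at this
    rw [this]
    simp
  have htokA := foldA_eq s.toList [] []
  simp only [List.nil_append] at htokA
  simp only [htokB, htokA, dedupA_eq]
  have hof : ((pvTok s.toList []).map String.ofList).foldl PySem.Set.add []
      = PySem.Set.ofList ((pvTok s.toList []).map String.ofList) := rfl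
  rw [hof]
  exact mergeSortA_eq_sorted _ (PySem.Set.nodup_ofList _)
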